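-- pv_equiv track=rewrite | github.com/42madrid/remote-challs | chall04/solution.py | permissive_search
-- ===== SOURCE A (Python) =====
-- def permissive_search(shelves, books):
--     shelves_copy = list(shelves)
--     for book in books:
--         if book > max(shelves_copy):
--             break
--         for i, s in enumerate(shelves_copy):
--             if book <= s:
--                 shelves_copy[i] -= book
--                 break
--     else:
--         return len([s for i, s in enumerate(shelves_copy) if s != shelves[i]])
-- ===== SOURCE B (Python) =====
-- def _build(xs):
--     if len(xs) == 1:
--         return (xs[0],)
--     m = len(xs) // 2
--     l = _build(xs[:m])
--     r = _build(xs[m:])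
--     return (max(l[0], r[0]), l, r)
--
-- def _update(t, b):
--     # precondition: b <= t[0] (the subtree max), so some leaf fits
--     if len(t) == 1:
--         return (t[0] - b,)
--     _, l, r = t
--     if b <= l[0]:
--         l = _update(l, b)
--     else:
--         r = _update(r, b)
--     return (max(l[0], r[0]), l, r)
--
-- def _flatten(t):
--     if len(t) == 1:
--         return [t[0]]
--     return _flatten(t[1]) + _flatten(t[2])
--
-- def permissive_search(shelves, books):
--     if not shelves:
--         return 0 if not books else None
--     t = _build(shelves)
--     for book in books:
--         if book > t[0]:
--             return None
--         t = _update(t, book)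
--     final = _flatten(t)
--     return sum(1 for a, b in zip(shelves, final) if a != b)
-- ===== Notes on version B (the rewrite author's own statement) =====
-- stated objective: alternative
-- what changed: Replaces A's per-book linear scan of the shelf list (and per-book max() recomputation) with a max segment tree: a leftmost-descent query finds the first fitting shelf, a point update subtracts the book, and the root caches the running max.
import Mathlib
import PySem

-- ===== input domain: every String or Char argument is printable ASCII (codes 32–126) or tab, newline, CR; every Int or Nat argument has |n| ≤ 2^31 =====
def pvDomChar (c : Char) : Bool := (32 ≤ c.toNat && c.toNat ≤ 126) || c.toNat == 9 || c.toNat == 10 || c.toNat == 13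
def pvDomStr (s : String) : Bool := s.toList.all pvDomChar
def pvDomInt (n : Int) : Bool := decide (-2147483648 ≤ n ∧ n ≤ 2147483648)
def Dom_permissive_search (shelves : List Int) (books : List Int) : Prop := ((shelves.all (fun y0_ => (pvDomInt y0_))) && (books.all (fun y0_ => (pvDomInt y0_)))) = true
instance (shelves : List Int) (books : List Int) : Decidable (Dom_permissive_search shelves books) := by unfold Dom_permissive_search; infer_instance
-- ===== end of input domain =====

-- B replaces A's linear scan for the first fitting shelf by a max segment tree
-- (leftmost-descent query + point update); equivalence of RETURN values only
-- (A mutates only its private copy, so no observable side effects anyway).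

-- ===== PORT A =====
-- inner loop of A: subtract `b` from the first element ≥ b (break), else leave list unchanged
def updateFirst (b : Int) : List Int → List Int
  | [] => []
  | s :: rest => if b ≤ s then (s - b) :: rest else s :: updateFirst b rest

-- outer loop of A; `none` = the `break` path (the for-else returns nothing → None)
def aLoop (shelves : List Int) : List Int → List Int → Option Int
  | cur, [] => some (((shelves.zip cur).filter (fun p => p.2 ≠ p.1)).length : Int)
  | cur, b :: bs =>
    match PySem.List.max? cur (fun x => x) with
    | none => none  -- Python's max([]) raises ValueError: excluded by Pre_
    | some m => if b > m then none else aLoop shelves (updateFirst b cur) bs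

def permissive_search (shelves : List Int) (books : List Int) : Option Int :=
  aLoop shelves shelves books

-- ===== PORT B =====
-- segment tree node: cached max, children (leaf carries the shelf value)
inductive STree where
  | leaf : Int → STree
  | node : Int → STree → STree → STree
deriving DecidableEq, Repr

def STree.mx : STree → Int
  | .leaf v => v
  | .node m _ _ => m

def buildT : List Int → STree
  | [] => .leaf 0            -- unreachable: B handles empty shelves before building
  | [x] => .leaf x
  | x :: y :: rest =>
    let xs := x :: y :: rest
    let m := xs.length / 2
    let l := buildT (xs.take m)
    let r := buildT (xs.drop m)
    .node (max l.mx r.mx) l r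
termination_by xs => xs.length
decreasing_by
  · simp [List.length_take]; omega
  · simp; omega

-- point update: descend to the leftmost leaf with value ≥ b (requires b ≤ t.mx)
def updT : STree → Int → STree
  | .leaf v, b => .leaf (v - b)
  | .node _ l r, b =>
    if b ≤ l.mx then
      let l' := updT l b
      .node (max l'.mx r.mx) l' r
    else
      let r' := updT r b
      .node (max l.mx r'.mx) l r'

def flatT : STree → List Int
  | .leaf v => [v]
  | .node _ l r => flatT l ++ flatT r

def altLoop (shelves : List Int) : STree → List Int → Option Int
  | t, [] => some (((shelves.zip (flatT t)).filter (fun p => p.1 ≠ p.2)).length : Int)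
  | t, b :: bs => if b > t.mx then none else altLoop shelves (updT t b) bs

def permissive_search_alt (shelves : List Int) (books : List Int) : Option Int :=
  match shelves with
  | [] => if books = [] then some 0 else none
  | _ :: _ => altLoop shelves (buildT shelves) books

-- ===== PRECONDITION & SPEC =====
-- Pre_ excludes only the inputs where A raises: empty shelves with a nonempty
-- book list make A call max([]) (ValueError).
def Pre_permissive_search (shelves : List Int) (books : List Int) : Prop :=
  shelves ≠ [] ∨ books = []
instance (shelves : List Int) (books : List Int) : Decidable (Pre_permissive_search shelves books) := by unfold Pre_permissive_search; infer_instance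

def pvWitness_permissive_search : List Int × List Int := ([5, 3], [2])

def Spec_permissive_search (shelves : List Int) (books : List Int) (out : Option Int) : Prop := out = permissive_search_alt shelves books
instance (shelves : List Int) (books : List Int) (out : Option Int) : Decidable (Spec_permissive_search shelves books out) := by unfold Spec_permissive_search; infer_instance

-- ===== CLAIM (what is proved, stated in full; the proofs are below) =====
def Claim_equal_permissive_search : Prop := ∀ (shelves : List Int) (books : List Int), Dom_permissive_search shelves books → Pre_permissive_search shelves books → Spec_permissive_search shelves books (permissive_search shelves books)

-- ===== LEMMAS AND PROOFS =====

theorem mx_leaf (v : Int) : STree.mx (.leaf v) = v := rfl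
theorem mx_node (m : Int) (l r : STree) : STree.mx (.node m l r) = m := rfl

-- invariant: every cached max is the max of the node's children
def wfT : STree → Prop
  | .leaf _ => True
  | .node m l r => m = max (STree.mx l) (STree.mx r) ∧ wfT l ∧ wfT r

theorem flatT_ne_nil (t : STree) : flatT t ≠ [] := by
  induction t with
  | leaf v => simp [flatT]
  | node m l r ihl ihr =>
    simp only [flatT]
    intro hc
    exact ihl (List.append_eq_nil_iff.mp hc).1

theorem mx_mem (t : STree) (h : wfT t) :
    STree.mx t ∈ flatT t ∧ ∀ x ∈ flatT t, x ≤ STree.mx t := by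
  induction t with
  | leaf v => simp [flatT, mx_leaf]
  | node m l r ihl ihr =>
    obtain ⟨hm, hl, hr⟩ := h
    obtain ⟨ml, bl⟩ := ihl hl
    obtain ⟨mr, br⟩ := ihr hr
    subst hm
    refine ⟨?_, ?_⟩
    · simp only [flatT, mx_node, List.mem_append]
      rcases le_total (STree.mx l) (STree.mx r) with hc | hc
      · rw [max_eq_right hc]; exact Or.inr mr
      · rw [max_eq_left hc]; exact Or.inl ml
    · intro x hx
      simp only [flatT, List.mem_append] at hx
      simp only [mx_node]
      rcases hx with hx | hx
      · exact le_max_of_le_left (bl x hx)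
      · exact le_max_of_le_right (br x hx)

theorem max?_flatT (t : STree) (h : wfT t) :
    PySem.List.max? (flatT t) (fun x => x) = some (STree.mx t) := by
  cases hm : PySem.List.max? (flatT t) (fun x => x) with
  | none => exact absurd ((PySem.List.max?_eq_none_iff _ _).mp hm) (flatT_ne_nil t)
  | some m =>
    obtain ⟨hmem, hmax⟩ := mx_mem t h
    have h1 : m ∈ flatT t := PySem.List.max?_mem hm
    have h2 : STree.mx t ≤ m := PySem.List.max?_isMax hm _ hmem
    have h3 : m ≤ STree.mx t := hmax m h1
    rw [le_antisymm h3 h2]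

theorem updateFirst_append_left (b : Int) (xs ys : List Int)
    (h : ∃ x ∈ xs, b ≤ x) : updateFirst b (xs ++ ys) = updateFirst b xs ++ ys := by
  induction xs with
  | nil => simp at h
  | cons x rest ih =>
    by_cases hx : b ≤ x
    · simp [updateFirst, hx]
    · have hr : ∃ y ∈ rest, b ≤ y := by
        obtain ⟨y, hy, hby⟩ := h
        simp at hy
        rcases hy with rfl | hy
        · exact absurd hby hx
        · exact ⟨y, hy, hby⟩
      simp [updateFirst, hx, ih hr]

theorem updateFirst_append_right (b : Int) (xs ys : List Int)
    (h : ∀ x ∈ xs, ¬ b ≤ x) : updateFirst b (xs ++ ys) = xs ++ updateFirst b ys := by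
  induction xs with
  | nil => simp
  | cons x rest ih =>
    have hx : ¬ b ≤ x := h x (by simp)
    simp only [List.cons_append, updateFirst, if_neg hx]
    rw [ih (fun y hy => h y (by simp [hy]))]

theorem updT_spec (t : STree) (b : Int) (hw : wfT t) (hb : b ≤ STree.mx t) :
    flatT (updT t b) = updateFirst b (flatT t) ∧ wfT (updT t b) := by
  induction t with
  | leaf v =>
    have hb' : b ≤ v := hb
    simp [updT, flatT, updateFirst, hb', wfT]
  | node m l r ihl ihr =>
    obtain ⟨hm, hl, hr⟩ := hw
    have hb' : b ≤ max (STree.mx l) (STree.mx r) := hm ▸ hb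
    by_cases hc : b ≤ STree.mx l
    · obtain ⟨h1, h2⟩ := ihl hl hc
      have hex : ∃ x ∈ flatT l, b ≤ x := ⟨STree.mx l, (mx_mem l hl).1, hc⟩
      refine ⟨?_, ?_⟩
      · simp only [updT, if_pos hc, flatT, h1]
        rw [updateFirst_append_left b _ _ hex]
      · simp only [updT, if_pos hc, wfT]
        first | exact ⟨rfl, h2, hr⟩ | exact ⟨trivial, h2, hr⟩
    · have hbr : b ≤ STree.mx r := (le_max_iff.mp hb').resolve_left hc
      obtain ⟨h1, h2⟩ := ihr hr hbr
      have hall : ∀ x ∈ flatT l, ¬ b ≤ x := by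
        intro x hx hbx
        exact hc (le_trans hbx ((mx_mem l hl).2 x hx))
      refine ⟨?_, ?_⟩
      · simp only [updT, if_neg hc, flatT, h1]
        rw [updateFirst_append_right b _ _ hall]
      · simp only [updT, if_neg hc, wfT]
        first | exact ⟨rfl, hl, h2⟩ | exact ⟨trivial, hl, h2⟩

theorem buildT_spec (n : Nat) : ∀ (xs : List Int), xs.length ≤ n → xs ≠ [] →
    flatT (buildT xs) = xs ∧ wfT (buildT xs) := by
  induction n with
  | zero =>
    intro xs hl hne
    cases xs with
    | nil => exact absurd rfl hne
    | cons a as => simp at hl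
  | succ n ih =>
    intro xs hl hne
    match xs with
    | [x] => simp [buildT, flatT, wfT]
    | x :: y :: rest =>
      have hm1 : 1 ≤ (x :: y :: rest).length / 2 := by simp; omega
      have hm2 : (x :: y :: rest).length / 2 < (x :: y :: rest).length := by simp; omega
      have hlen : (x :: y :: rest).length ≤ n + 1 := hl
      obtain ⟨fl, wl⟩ := ih ((x :: y :: rest).take ((x :: y :: rest).length / 2))
        (by simp only [List.length_take]; omega)
        (by intro hc
            have := congrArg List.length hc
            simp only [List.length_take, List.length_nil] at this
            omega)
      obtain ⟨fr, wr⟩ := ih ((x :: y :: rest).drop ((x :: y :: rest).length / 2))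
        (by simp only [List.length_drop]; omega)
        (by intro hc
            have := congrArg List.length hc
            simp only [List.length_drop, List.length_nil] at this
            omega)
      refine ⟨?_, ?_⟩
      · simp only [buildT, flatT, fl, fr, List.take_append_drop]
      · simp only [buildT, wfT]
        first | exact ⟨rfl, wl, wr⟩ | exact ⟨trivial, wl, wr⟩

theorem count_comm (shelves cur : List Int) :
    ((shelves.zip cur).filter (fun p => p.2 ≠ p.1)).length
      = ((shelves.zip cur).filter (fun p => p.1 ≠ p.2)).length := by
  congr 1
  apply List.filter_congr
  intro p _
  simp [ne_comm]

theorem loop_eq (shelves : List Int) (books : List Int) :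
    ∀ t : STree, wfT t → aLoop shelves (flatT t) books = altLoop shelves t books := by
  induction books with
  | nil =>
    intro t hw
    simp only [aLoop, altLoop]
    rw [count_comm]
  | cons b bs ih =>
    intro t hw
    rw [aLoop, altLoop, max?_flatT t hw]
    by_cases hc : b > STree.mx t
    · simp [hc]
    · obtain ⟨h1, h2⟩ := updT_spec t b hw (by omega)
      simp only [if_neg hc, ← h1, ih _ h2]

-- ===== VERDICT (by name: the statement is the Claim_ definition above) =====
theorem permissive_search_spec : Claim_equal_permissive_search := by
  intro shelves books _ hpre
  unfold Spec_permissive_search permissive_search permissive_search_alt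
  match shelves, hpre with
  | [], hpre =>
    have hb : books = [] := by
      rcases hpre with h | h
      · exact absurd rfl h
      · exact h
    subst hb
    simp [aLoop]
  | s :: rest, _ =>
    obtain ⟨hf, hw⟩ := buildT_spec (s :: rest).length (s :: rest) le_rfl (by simp)
    rw [← loop_eq, hf]
    exact hw
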